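-- pv_equiv track=rewrite | github.com/MissYueshuang/python_learning | Basic_and_Modules/String/string_trim.py | trim3
-- ===== SOURCE A (Python) =====
-- def trim3(s):
--     i = 0
--     j = len(s) - 1
--     while i < len(s):
--         if s[i] == ' ':
--             i = i + 1
--         else:
--             break
--     while j > -1:
--         if s[j] == ' ':
--             j = j - 1
--         else:
--             break
--     return s[i:j+1]
-- ===== SOURCE B (Python) =====
-- def trim3(s):
--     start = None
--     end = 0
--     for idx, ch in enumerate(s):
--         if ch != ' ':
--             if start is None:
--                 start = idx
--             end = idx
--     if start is None:
--         return ''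
--     return s[start:end + 1]
-- ===== Notes on version B (the rewrite author's own statement) =====
-- stated objective: alternative
-- what changed: Replaced A's two opposite-direction while loops (advancing i from the front and j from the back past spaces) with a single forward pass over enumerate(s) that records the first and last non-space index, returning an empty result when no non-space exists.
import Mathlib
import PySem

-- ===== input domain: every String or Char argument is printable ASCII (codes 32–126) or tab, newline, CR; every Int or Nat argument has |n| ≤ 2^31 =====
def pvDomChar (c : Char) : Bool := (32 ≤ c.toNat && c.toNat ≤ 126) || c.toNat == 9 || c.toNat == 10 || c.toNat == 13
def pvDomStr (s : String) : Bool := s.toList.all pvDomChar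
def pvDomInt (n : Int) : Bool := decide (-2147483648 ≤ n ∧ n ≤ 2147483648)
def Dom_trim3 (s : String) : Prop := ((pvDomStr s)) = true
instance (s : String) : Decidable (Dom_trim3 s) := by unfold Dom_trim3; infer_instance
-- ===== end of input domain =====

-- B replaces A's two opposite-direction space-skipping while loops with one forward pass
-- recording the first and last non-space index (alternative decomposition, same cost).

-- ===== PORT A =====
-- the space-skipping while loop: number of steps it advances from the front of the list
def trim3_lead : List Char → Nat
  | [] => 0
  | c :: t => if c = ' ' then trim3_lead t + 1 else 0

def trim3 (s : String) : String :=
  let l := s.toList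
  -- first while loop: i advances past leading spaces
  let i : Nat := trim3_lead l
  -- second while loop: j retreats past trailing spaces (structural recursion over the reverse)
  let j : Int := (l.length : Int) - 1 - (trim3_lead l.reverse : Int)
  String.mk (PySem.List.slice l (some (i : Int)) (some (j + 1)))

-- ===== PORT B =====
def trim3_step (acc : Option Int × Int) (p : Int × Char) : Option Int × Int :=
  if p.2 ≠ ' ' then (some (acc.1.getD p.1), p.1) else acc

def trim3_alt (s : String) : String :=
  let r := (PySem.List.enumerate s.toList).foldl trim3_step (none, 0)
  match r.1 with
  | none => ""
  | some st => String.mk (PySem.List.slice s.toList (some st) (some (r.2 + 1)))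

-- ===== PRECONDITION & SPEC =====
def Spec_trim3 (s : String) (out : String) : Prop := out = trim3_alt s
instance (s : String) (out : String) : Decidable (Spec_trim3 s out) := by unfold Spec_trim3; infer_instance

-- ===== CLAIM (what is proved, stated in full; the proofs are below) =====
def Claim_equal_trim3 : Prop := ∀ (s : String), Dom_trim3 s → Spec_trim3 s (trim3 s)

-- ===== LEMMAS AND PROOFS =====

theorem trim3_lead_all (l : List Char) (h : l.all (· = ' ')) : trim3_lead l = l.length := by
  induction l with
  | nil => rfl
  | cons c t ih =>
      simp only [List.all_cons, Bool.and_eq_true, decide_eq_true_eq] at h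
      simp [trim3_lead, h.1, ih h.2]

theorem trim3_lead_lt (l : List Char) (h : ¬ l.all (· = ' ')) : trim3_lead l < l.length := by
  induction l with
  | nil => simp at h
  | cons c t ih =>
      simp only [List.all_cons, Bool.and_eq_true, decide_eq_true_eq] at h
      by_cases hc : c = ' '
      · simp only [trim3_lead, if_pos hc, List.length_cons]
        have := ih (by tauto)
        omega
      · simp [trim3_lead, hc]

theorem trim3_lead_append (l l' : List Char) :
    trim3_lead (l ++ l') =
      if l.all (· = ' ') then l.length + trim3_lead l' else trim3_lead l := by
  induction l with
  | nil => simp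
  | cons c t ih =>
      by_cases hc : c = ' '
      · by_cases ht : t.all (· = ' ')
        · simp [trim3_lead, hc, ih, ht]; omega
        · simp [trim3_lead, hc, ih, ht]
      · simp [trim3_lead, hc]

-- characterisation of B's fold
theorem trim3_fold_char (l : List Char) :
    (PySem.List.enumerate l).foldl trim3_step (none, 0) =
      if l.all (· = ' ') then (none, 0)
      else (some (trim3_lead l : Int),
            (l.length : Int) - 1 - (trim3_lead l.reverse : Int)) := by
  induction l using List.reverseRecOn with
  | nil => simp [PySem.List.enumerate_nil]
  | append_singleton t c ih =>
      have henum : PySem.List.enumerate (t ++ [c]) 0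
          = PySem.List.enumerate t 0 ++ [((t.length : Int), c)] := by
        rw [PySem.List.enumerate_append]
        simp [PySem.List.enumerate_cons, PySem.List.enumerate_nil]
      rw [henum, List.foldl_append, ih]
      have h3' : trim3_lead (c :: t.reverse) = if c = ' ' then trim3_lead t.reverse + 1 else 0 := by
        by_cases hc : c = ' ' <;> simp [trim3_lead, hc]
      by_cases hc : c = ' '
      · subst hc
        have h0 : ((t ++ [' ']).all (· = ' ')) = (t.all (· = ' ')) := by
          simp [List.all_append]
        by_cases ht : t.all (· = ' ')
        · simp [trim3_step, ht, h0]
        · have h2 : trim3_lead (t ++ [' ']) = trim3_lead t := by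
            rw [trim3_lead_append]; simp [ht]
          have hk : trim3_lead t.reverse < t.length := by
            have := trim3_lead_lt t.reverse (by simpa using ht)
            simpa using this
          simp only [if_neg ht, h0, List.foldl_cons, List.foldl_nil, trim3_step,
            List.reverse_append, List.reverse_cons, List.reverse_nil,
            List.nil_append, List.singleton_append, h3', h2, ne_eq,
            not_true_eq_false, if_false, if_pos rfl,
            List.length_append, List.length_cons, List.length_nil, Prod.mk.injEq]
          refine ⟨trivial, ?_⟩
          push_cast; omega
      · have h1 : ¬ ((t ++ [c]).all (· = ' ')) = true := by
          simp [List.all_append, hc]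
        have hrev : trim3_lead (t ++ [c]).reverse = 0 := by
          simp only [List.reverse_append, List.reverse_cons, List.reverse_nil,
            List.nil_append, List.singleton_append, h3', if_neg hc]
        by_cases ht : t.all (· = ' ')
        · have h2 : trim3_lead (t ++ [c]) = t.length := by
            rw [trim3_lead_append]; simp [ht, trim3_lead, hc]
          simp only [if_pos ht, List.foldl_cons, List.foldl_nil, trim3_step,
            ne_eq, hc, not_false_eq_true, if_true, if_neg h1, h2, hrev,
            Option.getD_none, List.length_append, List.length_cons, List.length_nil]
          refine Prod.ext rfl ?_
          push_cast; omega
        · have h2 : trim3_lead (t ++ [c]) = trim3_lead t := by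
            rw [trim3_lead_append]; simp [ht]
          simp only [if_neg ht, List.foldl_cons, List.foldl_nil, trim3_step,
            ne_eq, hc, not_false_eq_true, if_true, if_neg h1, h2, hrev,
            Option.getD_some, List.length_append, List.length_cons, List.length_nil]
          refine Prod.ext rfl ?_
          push_cast; omega

-- ===== VERDICT (by name: the statement is the Claim_ definition above) =====
theorem trim3_spec : Claim_equal_trim3 := by
  intro s _
  unfold Spec_trim3 trim3 trim3_alt
  rw [trim3_fold_char]
  set l := s.toList with hl
  by_cases h : l.all (· = ' ')
  · have hi : trim3_lead l = l.length := trim3_lead_all l h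
    have hk : trim3_lead l.reverse = l.length := by
      have := trim3_lead_all l.reverse (by simpa using h)
      simpa using this
    simp only [if_pos h, hi, hk]
    have : PySem.List.slice l (some (l.length : Int))
        (some ((l.length : Int) - 1 - (l.length : Int) + 1)) = [] := by
      have hb : ((l.length : Int) - 1 - (l.length : Int) + 1) = (0 : Int) := by ring
      rw [hb]
      rcases Nat.eq_zero_or_pos l.length with h0 | h0
      · simp [List.eq_nil_of_length_eq_zero h0, PySem.List.slice]
      · rw [show (0:Int) = ((0:Nat):Int) by simp, PySem.List.slice_natCast]
        simp
    rw [this]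
    rfl
  · simp only [if_neg h]
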